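-- pv_equiv track=rewrite | github.com/luckykamon/IPT | TD/prof/td11a.py | somme
-- ===== SOURCE A (Python) =====
-- def somme(p1,p2):
--   n1,n2 = len(p1),len(p2)
--   maxi = max(n1,n2)
--   l = [0] * maxi
--   for k in range(n1):
--     l[k] = p1[k]
--   for k in range(n2):
--     l[k] += p2[k]
--   return l
-- ===== SOURCE B (Python) =====
-- from itertools import zip_longest
--
-- def somme(p1, p2):
--     return [a + b for a, b in zip_longest(p1, p2, fillvalue=0)]
-- ===== Notes on version B (the rewrite author's own statement) =====
-- stated objective: idiomatic
-- what changed: Replaces A's preallocate-copy-then-accumulate two-phase index mutation with a single zip_longest pass over aligned pairs padded with 0.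
import Mathlib
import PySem

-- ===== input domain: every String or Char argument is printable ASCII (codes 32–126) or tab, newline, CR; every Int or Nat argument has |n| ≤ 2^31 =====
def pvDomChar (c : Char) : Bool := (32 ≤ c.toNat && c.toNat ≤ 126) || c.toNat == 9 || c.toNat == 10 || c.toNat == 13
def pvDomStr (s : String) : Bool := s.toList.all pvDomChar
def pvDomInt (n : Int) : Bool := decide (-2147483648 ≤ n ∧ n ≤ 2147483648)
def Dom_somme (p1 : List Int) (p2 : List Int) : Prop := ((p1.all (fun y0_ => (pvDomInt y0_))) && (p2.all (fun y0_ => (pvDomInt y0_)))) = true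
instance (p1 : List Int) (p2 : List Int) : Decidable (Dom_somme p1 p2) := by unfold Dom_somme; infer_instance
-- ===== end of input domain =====

-- B replaces A's preallocate-copy-then-accumulate two-phase index mutation with one zip_longest pass (idiomatic; same cost).

-- ===== PORT A =====
-- l = [0]*maxi; for k in range(n1): l[k] = p1[k]; for k in range(n2): l[k] += p2[k]
def somme (p1 : List Int) (p2 : List Int) : List Int :=
  let n1 := p1.length
  let n2 := p2.length
  let maxi := max n1 n2
  let l := List.replicate maxi (0 : Int)
  let l := (List.range n1).foldl (fun acc k => acc.set k (p1.getD k 0)) l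
  let l := (List.range n2).foldl (fun acc k => acc.set k (acc.getD k 0 + p2.getD k 0)) l
  l

-- ===== PORT B =====
-- [a + b for a, b in zip_longest(p1, p2, fillvalue=0)]
def somme_alt : List Int → List Int → List Int
  | [], [] => []
  | [], b :: bs => (0 + b) :: somme_alt [] bs
  | a :: as_, [] => (a + 0) :: somme_alt as_ []
  | a :: as_, b :: bs => (a + b) :: somme_alt as_ bs

-- ===== PRECONDITION & SPEC =====
def Spec_somme (p1 : List Int) (p2 : List Int) (out : List Int) : Prop := out = somme_alt p1 p2
instance (p1 : List Int) (p2 : List Int) (out : List Int) : Decidable (Spec_somme p1 p2 out) := by unfold Spec_somme; infer_instance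

-- ===== CLAIM (what is proved, stated in full; the proofs are below) =====
def Claim_equal_somme : Prop := ∀ (p1 : List Int) (p2 : List Int), Dom_somme p1 p2 → Spec_somme p1 p2 (somme p1 p2)

-- ===== LEMMAS AND PROOFS =====

-- generic characterisation of a fold that sets position k from its old value, k running over range n
theorem pv_foldl_set_range (g : Int → Nat → Int) (l : List Int) (n : Nat) (h : n ≤ l.length) :
    ((List.range n).foldl (fun acc k => acc.set k (g (acc.getD k 0) k)) l).length = l.length ∧
    ∀ k, ((List.range n).foldl (fun acc k => acc.set k (g (acc.getD k 0) k)) l).getD k 0 =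
      if k < n then g (l.getD k 0) k else l.getD k 0 := by
  induction n with
  | zero => simp
  | succ m ih =>
    obtain ⟨hlen, hget⟩ := ih (Nat.le_of_succ_le h)
    rw [List.range_succ, List.foldl_append]
    set r := (List.range m).foldl (fun acc k => acc.set k (g (acc.getD k 0) k)) l with hr
    have hm : m < r.length := by omega
    constructor
    · simp [List.length_set, hlen]
    · intro k
      have hrm : r.getD m 0 = l.getD m 0 := by simpa using hget m
      simp only [List.foldl_cons, List.foldl_nil]
      rcases eq_or_ne k m with rfl | hne
      · have : (r.set k (g (r.getD k 0) k)).getD k 0 = g (r.getD k 0) k := by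
          simp [List.getD, List.getElem?_set_self hm]
        rw [this, hrm]
        simp
      · have : (r.set m (g (r.getD m 0) m)).getD k 0 = r.getD k 0 := by
          simp [List.getD, List.getElem?_set_ne (Ne.symm hne)]
        rw [this, hget k]
        rcases Nat.lt_trichotomy k m with hk | hk | hk
        · simp [hk, Nat.lt_succ_of_lt hk]
        · exact absurd hk hne
        · have h1 : ¬ k < m := by omega
          have h2 : ¬ k < m + 1 := by omega
          simp [h1, h2]

theorem somme_alt_length (p1 p2 : List Int) : (somme_alt p1 p2).length = max p1.length p2.length := by
  induction p1 generalizing p2 with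
  | nil =>
    induction p2 with
    | nil => simp [somme_alt]
    | cons b bs ih => simp [somme_alt, ih]
  | cons a as_ ih =>
    cases p2 with
    | nil =>
      simp [somme_alt, ih []]
    | cons b bs =>
      simp [somme_alt, ih bs]

theorem somme_alt_getD (p1 p2 : List Int) (k : Nat) :
    (somme_alt p1 p2).getD k 0 = p1.getD k 0 + p2.getD k 0 := by
  induction p1 generalizing p2 k with
  | nil =>
    induction p2 generalizing k with
    | nil => simp [somme_alt]
    | cons b bs ih =>
      cases k with
      | zero => simp [somme_alt]
      | succ j => simpa [somme_alt] using ih j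
  | cons a as_ ih =>
    cases p2 with
    | nil =>
      cases k with
      | zero => simp [somme_alt]
      | succ j => simpa [somme_alt] using ih [] j
    | cons b bs =>
      cases k with
      | zero => simp [somme_alt]
      | succ j => simpa [somme_alt] using ih bs j

theorem somme_eq_alt (p1 p2 : List Int) : somme p1 p2 = somme_alt p1 p2 := by
  have key : somme p1 p2 =
      (List.range p2.length).foldl
        (fun acc k => acc.set k ((fun v k => v + p2.getD k 0) (acc.getD k 0) k))
        ((List.range p1.length).foldl
          (fun acc k => acc.set k ((fun _ k => p1.getD k 0) (acc.getD k 0) k))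
          (List.replicate (max p1.length p2.length) (0 : Int))) := rfl
  obtain ⟨h1len, h1get⟩ := pv_foldl_set_range (fun _ k => p1.getD k 0)
    (List.replicate (max p1.length p2.length) (0 : Int)) p1.length (by simp)
  obtain ⟨h2len, h2get⟩ := pv_foldl_set_range (fun v k => v + p2.getD k 0)
    ((List.range p1.length).foldl
      (fun acc k => acc.set k ((fun _ k => p1.getD k 0) (acc.getD k 0) k))
      (List.replicate (max p1.length p2.length) (0 : Int))) p2.length
    (by rw [h1len]; simp)
  rw [key]
  apply List.ext_getElem
  · rw [h2len, h1len, somme_alt_length]; simp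
  · intro i hi hi'
    have hgetd : ∀ (xs : List Int) (j : Nat) (hj : j < xs.length), xs[j] = xs.getD j 0 := by
      intro xs j hj; simp [List.getD, List.getElem?_eq_getElem hj]
    rw [hgetd _ i hi, hgetd _ i hi', h2get i, h1get i, somme_alt_getD]
    have hl0get : (List.replicate (max p1.length p2.length) (0 : Int)).getD i 0 = 0 := by
      simp [List.getD, List.getElem?_replicate]
      split <;> rfl
    have hp1 : ¬ i < p1.length → p1.getD i 0 = 0 := fun h =>
      List.getD_eq_default _ _ (Nat.le_of_not_lt h)
    have hp2 : ¬ i < p2.length → p2.getD i 0 = 0 := fun h =>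
      List.getD_eq_default _ _ (Nat.le_of_not_lt h)
    by_cases c1 : i < p1.length <;> by_cases c2 : i < p2.length <;>
      simp [c1, c2, hl0get, hp1 , hp2]

-- ===== VERDICT (by name: the statement is the Claim_ definition above) =====
theorem somme_spec : Claim_equal_somme := by
  intro p1 p2 _
  unfold Spec_somme
  exact somme_eq_alt p1 p2
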